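-- pv_equiv track=rewrite | github.com/jskim7018/leetcode_study | algorithm_study/2025/04/20250418/daily_20/LC_2453.py | destroyTargets
-- ===== SOURCE A (Python) =====
-- from typing import List
-- from collections import defaultdict
--
-- def destroyTargets(nums: List[int], space: int) -> int:
--     mp = defaultdict(int)
--
--     for num in nums:
--         mp[num % space] += 1
--
--     curr_max = 0
--     ans = float('inf')
--     for num in nums:
--         if curr_max < mp[num % space]:
--             ans = num
--             curr_max = mp[num % space]
--         elif curr_max == mp[num%space]:
--             ans = min(ans, num)
--
--     return ans
-- ===== SOURCE B (Python) =====
-- from typing import List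
--
-- def destroyTargets(nums: List[int], space: int) -> int:
--     best_c, best_v = 0, float('inf')
--     rest = nums
--     while rest:
--         r0 = rest[0] % space
--         group = [n for n in rest if n % space == r0]
--         rest = [n for n in rest if n % space != r0]
--         c, v = len(group), min(group)
--         if best_c < c or (best_c == c and v < best_v):
--             best_c, best_v = c, v
--     return best_v
-- ===== Notes on version B (the rewrite author's own statement) =====
-- stated objective: alternative
-- what changed: Drops A's Counter dict and greedy if/elif scan entirely: B is a dict-free partition loop that repeatedly splits the remaining list into the first element's residue class and the rest, keeping the lexicographically best (count, class-minimum) pair per class.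
-- outside the precondition, e.g. on destroyTargets([], 3): A returns inf, B returns inf; on destroyTargets([1, 2], 0): A raises ZeroDivisionError, B raises ZeroDivisionError
import Mathlib
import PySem

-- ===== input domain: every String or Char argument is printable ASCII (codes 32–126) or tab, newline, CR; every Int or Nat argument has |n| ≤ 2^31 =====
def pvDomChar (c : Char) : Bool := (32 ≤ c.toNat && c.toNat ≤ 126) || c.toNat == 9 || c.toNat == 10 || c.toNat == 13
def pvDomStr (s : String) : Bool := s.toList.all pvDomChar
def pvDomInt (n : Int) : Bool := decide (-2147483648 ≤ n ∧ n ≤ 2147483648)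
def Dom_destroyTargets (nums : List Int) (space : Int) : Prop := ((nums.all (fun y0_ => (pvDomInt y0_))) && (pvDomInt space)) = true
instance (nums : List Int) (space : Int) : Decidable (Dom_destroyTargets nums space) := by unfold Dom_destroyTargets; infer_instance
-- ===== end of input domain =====

-- B replaces A's Counter dict and interleaved greedy scan with a dict-free partition loop:
-- it repeatedly splits the remaining list into the first element's residue class and the rest,
-- keeping the lexicographically best (count, class-minimum) pair.

-- ===== PORT A =====
def destroyTargets (nums : List Int) (space : Int) : Int :=
  let mp := nums.foldl (fun d num => d.modify (PySem.Int.mod num space) 0 (· + 1)) PySem.Dict.empty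
  let res := nums.foldl (fun (s : Int × Option Int) num =>
      if s.1 < mp.getD (PySem.Int.mod num space) 0 then
        (mp.getD (PySem.Int.mod num space) 0, some num)
      else if s.1 == mp.getD (PySem.Int.mod num space) 0 then
        (s.1, some (match s.2 with | none => num | some a => min a num))
      else s) ((0 : Int), (none : Option Int))
  -- ans starts as float('inf'); it is still inf (no Int value) only when nums = [], excluded by Pre_
  res.2.getD 0

-- ===== PORT B =====
-- the while loop of Source B: state (best_c, best_v) with best_v = none meaning float('inf')
def pvGoB (space : Int) (bc : Int) (bv : Option Int) : List Int → Int × Option Int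
  | [] => (bc, bv)
  | x :: t =>
    let r0 := PySem.Int.mod x space
    let group := (x :: t).filter (fun n => PySem.Int.mod n space == r0)
    let rest := (x :: t).filter (fun n => !(PySem.Int.mod n space == r0))
    let c : Int := group.length
    -- min(group): group always contains the head, so min? is some; getD 0 never used
    let v : Int := (PySem.List.min? group (fun y => y)).getD 0
    if bc < c || (bc == c && (match bv with | none => true | some b => v < b)) then
      pvGoB space c (some v) rest
    else
      pvGoB space bc bv rest
termination_by lst => lst.length
decreasing_by
  all_goals
    simp only [List.filter_cons, beq_self_eq_true, Bool.not_true, if_neg, Bool.false_eq_true,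
      not_false_eq_true, List.length_cons]
    exact Nat.lt_succ_of_le (List.length_filter_le _ _)

def destroyTargets_alt (nums : List Int) (space : Int) : Int :=
  -- best_v is still float('inf') (no Int value) only when nums = [], excluded by Pre_
  (pvGoB space 0 none nums).2.getD 0

-- ===== PRECONDITION & SPEC =====
-- Pre_ excludes space = 0 (both programs raise ZeroDivisionError) and nums = [] (both programs
-- return float('inf'), which is not a value of the declared int type).
def Pre_destroyTargets (nums : List Int) (space : Int) : Prop := nums ≠ [] ∧ space ≠ 0
instance (nums : List Int) (space : Int) : Decidable (Pre_destroyTargets nums space) := by unfold Pre_destroyTargets; infer_instance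
def pvWitness_destroyTargets : List Int × Int := ([3, 7, 8, 1, 1, 5], 2)

def Spec_destroyTargets (nums : List Int) (space : Int) (out : Int) : Prop := out = destroyTargets_alt nums space
instance (nums : List Int) (space : Int) (out : Int) : Decidable (Spec_destroyTargets nums space out) := by unfold Spec_destroyTargets; infer_instance

-- ===== CLAIM (what is proved, stated in full; the proofs are below) =====
def Claim_equal_destroyTargets : Prop := ∀ (nums : List Int) (space : Int), Dom_destroyTargets nums space → Pre_destroyTargets nums space → Spec_destroyTargets nums space (destroyTargets nums space)

-- ===== LEMMAS AND PROOFS =====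

-- count of n's residue class within lst
def pvCnt (space : Int) (lst : List Int) (n : Int) : Int :=
  (lst.countP (fun m => PySem.Int.mod m space == PySem.Int.mod n space) : Nat)

-- the maximal class count in lst
def pvMx (space : Int) (lst : List Int) : Int :=
  (lst.map (pvCnt space lst)).foldl max 0

-- the minimum of the elements whose class count is maximal
def pvAch (space : Int) (lst : List Int) : Option Int :=
  (lst.filter (fun n => pvCnt space lst n == pvMx space lst)).min?

def pvOmin : Option Int → Option Int → Option Int
  | none, y => y
  | some a, none => some a
  | some a, some b => some (min a b)

-- A's greedy loop, with the dict lookup abstracted into c, computes the running max of counts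
-- together with the running min of the elements achieving the current max.
theorem loopA_char (c : Int → Int) (l : List Int) :
    l.foldl (fun (s : Int × Option Int) num =>
      if s.1 < c num then (c num, some num)
      else if s.1 == c num then (s.1, some (match s.2 with | none => num | some a => min a num))
      else s) ((0 : Int), (none : Option Int))
    = ((l.map c).foldl max 0,
       (l.filter (fun n => c n == (l.map c).foldl max 0)).min?) := by
  induction l using List.reverseRecOn with
  | nil => simp
  | append_singleton q x ih =>
    have hM : ((q ++ [x]).map c).foldl max 0 = max ((q.map c).foldl max 0) (c x) := by
      simp [List.foldl_append]
    have hub : ∀ n ∈ q, c n ≤ (q.map c).foldl max 0 := by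
      intro n hn
      exact (PySem.List.le_foldl_max (q.map c) 0).2 (c n) (List.mem_map_of_mem hn)
    rw [List.foldl_append, ih]
    simp only [List.foldl_cons, List.foldl_nil]
    by_cases h1 : (q.map c).foldl max 0 < c x
    · have hMx : max ((q.map c).foldl max 0) (c x) = c x := by omega
      have hfq : q.filter (fun n => c n == c x) = [] := by
        rw [List.filter_eq_nil_iff]
        intro n hn hcn
        have := hub n hn
        simp only [beq_iff_eq] at hcn
        omega
      simp [h1, hMx, List.filter_append, hfq]
    · by_cases h2 : (q.map c).foldl max 0 = c x
      · have hMx : max ((q.map c).foldl max 0) (c x) = (q.map c).foldl max 0 := by omega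
        have h2' : ((q.map c).foldl max 0 == c x) = true := by simp [h2]
        have hf : (q ++ [x]).filter (fun n => c n == (q.map c).foldl max 0)
            = q.filter (fun n => c n == (q.map c).foldl max 0) ++ [x] := by
          simp [List.filter_append, h2.symm]
        rw [hM, hMx, hf]
        simp only [if_neg h1, h2', if_true]
        cases hFq : q.filter (fun n => c n == (q.map c).foldl max 0) with
        | nil => simp [List.min?]
        | cons y t => simp [List.min?, List.foldl_append]
      · have h3 : c x < (q.map c).foldl max 0 := by omega
        have hMx : max ((q.map c).foldl max 0) (c x) = (q.map c).foldl max 0 := by omega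
        have hf : (q ++ [x]).filter (fun n => c n == (q.map c).foldl max 0)
            = q.filter (fun n => c n == (q.map c).foldl max 0) := by
          simp [List.filter_append]
          omega
        have hne : ((q.map c).foldl max 0 == c x) = false := by
          simp; omega
        simp [h1, hne, hMx, hf]

-- A's defaultdict-increment loop over nums is the counter of the mapped remainders.
theorem mpA_eq_counter (nums : List Int) (space : Int) :
    nums.foldl (fun d num => d.modify (PySem.Int.mod num space) 0 (· + 1)) PySem.Dict.empty
      = PySem.Dict.counter (nums.map (fun num => PySem.Int.mod num space)) := by
  rw [PySem.Dict.counter_eq_foldl, List.foldl_map]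

theorem min?_eq_pymin (l : List Int) :
    l.min? = PySem.List.min? l (fun y => y) := by
  cases l with
  | nil => simp [PySem.List.min?]
  | cons y t => rw [PySem.List.min?_id_cons]; simp [List.min?]

-- membership in the residue class of x
def pvP (space x n : Int) : Bool := PySem.Int.mod n space == PySem.Int.mod x space

-- the residue class of the head, and the remainder of the list
def pvG (space x : Int) (t : List Int) : List Int := (x :: t).filter (pvP space x)
def pvR (space x : Int) (t : List Int) : List Int := (x :: t).filter (fun n => !pvP space x n)

theorem pvCnt_eq_countP (space : Int) (lst : List Int) (n : Int) :
    pvCnt space lst n = (lst.countP (pvP space n) : Nat) := rfl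

theorem pvP_same (space x n : Int) (h : pvP space x n = true) :
    pvP space n = pvP space x := by
  funext m
  simp only [pvP, beq_iff_eq] at *
  rw [h]

theorem cnt_group (space x : Int) (t : List Int) (n : Int) (h : pvP space x n = true) :
    pvCnt space (x :: t) n = ((pvG space x t).length : Nat) := by
  rw [pvCnt_eq_countP, pvP_same space x n h, pvG, List.countP_eq_length_filter]

theorem cnt_rest (space x : Int) (t : List Int) (n : Int) (h : pvP space x n = false) :
    pvCnt space (pvR space x t) n = pvCnt space (x :: t) n := by
  rw [pvCnt_eq_countP, pvCnt_eq_countP, pvR, List.countP_filter]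
  refine congrArg _ (List.countP_congr ?_)
  intro m _
  by_cases hm : pvP space n m = true
  · have : pvP space x m = false := by
      simp only [pvP, beq_iff_eq] at *
      rw [hm]; exact h
    simp [hm, this]
  · simp [Bool.eq_false_iff.mpr hm]

theorem cnt_mem_le_Mx (space : Int) (lst : List Int) (n : Int) (h : n ∈ lst) :
    pvCnt space lst n ≤ pvMx space lst := by
  exact (PySem.List.le_foldl_max (lst.map (pvCnt space lst)) 0).2 _ (List.mem_map_of_mem h)

theorem Mx_nonneg (space : Int) (lst : List Int) : 0 ≤ pvMx space lst :=
  (PySem.List.le_foldl_max (lst.map (pvCnt space lst)) 0).1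

theorem Mx_cons (space x : Int) (t : List Int) :
    pvMx space (x :: t) = max ((pvG space x t).length : Int) (pvMx space (pvR space x t)) := by
  have hx : pvP space x x = true := by simp [pvP]
  have hg : ((pvG space x t).length : Int) ≤ pvMx space (x :: t) := by
    have := cnt_mem_le_Mx space (x :: t) x (by simp)
    rwa [cnt_group space x t x hx] at this
  have hr : pvMx space (pvR space x t) ≤ pvMx space (x :: t) := by
    rcases PySem.List.foldl_max_mem ((pvR space x t).map (pvCnt space (pvR space x t))) 0 with h0 | hmem
    · have h0' : pvMx space (pvR space x t) = 0 := h0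
      rw [h0']; exact Mx_nonneg space (x :: t)
    · rcases List.mem_map.mp hmem with ⟨n, hn, hv⟩
      have hnp : pvP space x n = false := by
        have := (List.mem_filter.mp hn).2
        simpa using this
      have hn' : n ∈ x :: t := (List.mem_filter.mp hn).1
      have hv' : pvCnt space (pvR space x t) n = pvMx space (pvR space x t) := hv
      calc pvMx space (pvR space x t) = pvCnt space (pvR space x t) n := hv'.symm
        _ = pvCnt space (x :: t) n := cnt_rest space x t n hnp
        _ ≤ pvMx space (x :: t) := cnt_mem_le_Mx space (x :: t) n hn'
  have hle : pvMx space (x :: t) ≤ max ((pvG space x t).length : Int) (pvMx space (pvR space x t)) := by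
    rcases PySem.List.foldl_max_mem ((x :: t).map (pvCnt space (x :: t))) 0 with h0 | hmem
    · have h0' : pvMx space (x :: t) = 0 := h0
      have : (0 : Int) ≤ ((pvG space x t).length : Int) := by positivity
      omega
    · rcases List.mem_map.mp hmem with ⟨n, hn, hv⟩
      have hv' : pvCnt space (x :: t) n = pvMx space (x :: t) := hv
      by_cases hp : pvP space x n = true
      · have := cnt_group space x t n hp
        omega
      · have hp' : pvP space x n = false := Bool.eq_false_iff.mpr hp
        have h1 : pvCnt space (x :: t) n = pvCnt space (pvR space x t) n :=
          (cnt_rest space x t n hp').symm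
        have hn' : n ∈ pvR space x t := List.mem_filter.mpr ⟨hn, by simp [hp']⟩
        have h2 := cnt_mem_le_Mx space (pvR space x t) n hn'
        omega
  omega

theorem pvOmin_none_right (m : Option Int) : pvOmin m none = m := by
  cases m <;> rfl

theorem ach_high (space x : Int) (t : List Int)
    (h : pvMx space (pvR space x t) < ((pvG space x t).length : Int)) :
    pvAch space (x :: t) = (pvG space x t).min? := by
  have hM : pvMx space (x :: t) = ((pvG space x t).length : Int) := by
    have := Mx_cons space x t; omega
  have hfe : (x :: t).filter (fun n => pvCnt space (x :: t) n == pvMx space (x :: t))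
      = pvG space x t := by
    apply List.filter_congr
    intro n hn
    by_cases hp : pvP space x n = true
    · have := cnt_group space x t n hp
      simp only [beq_iff_eq, hp]
      rw [this, hM]
    · have hp' : pvP space x n = false := Bool.eq_false_iff.mpr hp
      have h1 : pvCnt space (x :: t) n = pvCnt space (pvR space x t) n :=
        (cnt_rest space x t n hp').symm
      have hn' : n ∈ pvR space x t := List.mem_filter.mpr ⟨hn, by simp [hp']⟩
      have h2 := cnt_mem_le_Mx space (pvR space x t) n hn'
      rw [hp', beq_eq_false_iff_ne]
      omega
  rw [pvAch, hfe]

theorem ach_low (space x : Int) (t : List Int)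
    (h : ((pvG space x t).length : Int) < pvMx space (x :: t)) :
    pvAch space (x :: t) = pvAch space (pvR space x t) := by
  have hMc := Mx_cons space x t
  have hM : pvMx space (x :: t) = pvMx space (pvR space x t) := by omega
  have hfe : (x :: t).filter (fun n => pvCnt space (x :: t) n == pvMx space (x :: t))
      = (pvR space x t).filter (fun n => pvCnt space (pvR space x t) n == pvMx space (pvR space x t)) := by
    rw [pvR, List.filter_filter]
    apply List.filter_congr
    intro n hn
    by_cases hp : pvP space x n = true
    · have := cnt_group space x t n hp
      simp only [hp, Bool.not_true, Bool.and_false]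
      rw [beq_eq_false_iff_ne]
      omega
    · have hp' : pvP space x n = false := Bool.eq_false_iff.mpr hp
      have h1 : pvCnt space (x :: t) n = pvCnt space (pvR space x t) n :=
        (cnt_rest space x t n hp').symm
      rw [hp']
      simp only [Bool.not_false, Bool.and_true]
      rw [h1, hM]
      rfl
  rw [pvAch, hfe, pvAch]

theorem ach_tie (space x : Int) (t : List Int)
    (h : pvMx space (pvR space x t) = ((pvG space x t).length : Int)) :
    pvAch space (x :: t) = pvOmin (pvG space x t).min? (pvAch space (pvR space x t)) := by
  have hMc := Mx_cons space x t
  have hM : pvMx space (x :: t) = ((pvG space x t).length : Int) := by omega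
  have hxG : x ∈ pvG space x t := List.mem_filter.mpr ⟨by simp, by simp [pvP]⟩
  cases hAr : pvAch space (pvR space x t) with
  | none =>
    have hRf : (pvR space x t).filter
        (fun n => pvCnt space (pvR space x t) n == pvMx space (pvR space x t)) = [] := by
      rw [pvAch] at hAr
      exact List.min?_eq_none_iff.mp hAr
    have hfe : (x :: t).filter (fun n => pvCnt space (x :: t) n == pvMx space (x :: t))
        = pvG space x t := by
      apply List.filter_congr
      intro n hn
      by_cases hp : pvP space x n = true
      · have := cnt_group space x t n hp
        simp only [beq_iff_eq, hp]
        rw [this, hM]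
      · have hp' : pvP space x n = false := Bool.eq_false_iff.mpr hp
        have h1 : pvCnt space (x :: t) n = pvCnt space (pvR space x t) n :=
          (cnt_rest space x t n hp').symm
        have hn' : n ∈ pvR space x t := List.mem_filter.mpr ⟨hn, by simp [hp']⟩
        have hne : pvCnt space (pvR space x t) n ≠ pvMx space (pvR space x t) := by
          intro hq
          have : n ∈ (pvR space x t).filter
              (fun n => pvCnt space (pvR space x t) n == pvMx space (pvR space x t)) :=
            List.mem_filter.mpr ⟨hn', by simp [hq]⟩
          rw [hRf] at this
          exact absurd this (List.not_mem_nil)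
        rw [hp', beq_eq_false_iff_ne]
        omega
    rw [pvAch, hfe, pvOmin_none_right]
  | some b =>
    rw [pvAch] at hAr
    obtain ⟨hbmem, hblb⟩ := List.min?_eq_some_iff.mp hAr
    obtain ⟨hbR, hbq⟩ := List.mem_filter.mp hbmem
    obtain ⟨hbl, hbp⟩ := List.mem_filter.mp hbR
    have hbp' : pvP space x b = false := by simpa using hbp
    cases hGm : (pvG space x t).min? with
    | none =>
      exact absurd (List.min?_eq_none_iff.mp hGm) (List.ne_nil_of_mem hxG)
    | some vg =>
      obtain ⟨hvmem, hvlb⟩ := List.min?_eq_some_iff.mp hGm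
      obtain ⟨hvl, hvp⟩ := List.mem_filter.mp hvmem
      have hq_of_G : ∀ n ∈ x :: t, pvP space x n = true →
          (pvCnt space (x :: t) n == pvMx space (x :: t)) = true := by
        intro n hn hp
        have := cnt_group space x t n hp
        simp only [beq_iff_eq]
        rw [this, hM]
      have hq_of_R : ∀ n, n ∈ x :: t → pvP space x n = false →
          (pvCnt space (pvR space x t) n == pvMx space (pvR space x t)) = true →
          (pvCnt space (x :: t) n == pvMx space (x :: t)) = true := by
        intro n hn hp hq
        have h1 := cnt_rest space x t n hp
        simp only [beq_iff_eq] at hq ⊢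
        omega
      have : ((x :: t).filter (fun n => pvCnt space (x :: t) n == pvMx space (x :: t))).min?
          = some (min vg b) := by
        apply List.min?_eq_some_iff.mpr
        constructor
        · rcases min_choice vg b with hmin | hmin <;> rw [hmin]
          · exact List.mem_filter.mpr ⟨hvl, hq_of_G vg hvl hvp⟩
          · exact List.mem_filter.mpr ⟨hbl, hq_of_R b hbl hbp' hbq⟩
        · intro y hy
          obtain ⟨hyl, hyq⟩ := List.mem_filter.mp hy
          by_cases hp : pvP space x y = true
          · have hyG : y ∈ pvG space x t := List.mem_filter.mpr ⟨hyl, hp⟩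
            have := hvlb y hyG
            omega
          · have hp' : pvP space x y = false := Bool.eq_false_iff.mpr hp
            have h1 := cnt_rest space x t y hp'
            have hyR : y ∈ pvR space x t := List.mem_filter.mpr ⟨hyl, by simp [hp']⟩
            have hyq' : (pvCnt space (pvR space x t) y == pvMx space (pvR space x t)) = true := by
              simp only [beq_iff_eq] at hyq ⊢
              omega
            have := hblb y (List.mem_filter.mpr ⟨hyR, hyq'⟩)
            omega
      rw [pvAch, this]
      rfl

theorem pvOmin_absorb (b vg : Int) (m : Option Int) (h : vg < b) :
    pvOmin (some b) (pvOmin (some vg) m) = pvOmin (some vg) m := by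
  cases m <;> simp [pvOmin] <;> omega

theorem pvOmin_skip (b vg : Int) (m : Option Int) (h : b ≤ vg) :
    pvOmin (some b) (pvOmin (some vg) m) = pvOmin (some b) m := by
  cases m <;> simp [pvOmin] <;> omega

theorem pvGoB_spec (space : Int) : ∀ (k : Nat) (lst : List Int), lst.length ≤ k →
    ∀ (bc : Int) (bv : Option Int), 0 ≤ bc →
    pvGoB space bc bv lst = (if pvMx space lst < bc then (bc, bv)
      else if pvMx space lst = bc then (bc, pvOmin bv (pvAch space lst))
      else (pvMx space lst, pvAch space lst)) := by
  intro k
  induction k with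
  | zero =>
    intro lst hlen bc bv hbc
    have hnil : lst = [] := List.eq_nil_of_length_eq_zero (Nat.le_zero.mp hlen)
    subst hnil
    rw [pvGoB]
    have hM : pvMx space ([] : List Int) = 0 := rfl
    rw [hM]
    split_ifs with h1 h2
    · rfl
    · rw [show pvAch space ([] : List Int) = none from rfl, pvOmin_none_right]
    · omega
  | succ k ih =>
    intro lst hlen bc bv hbc
    cases lst with
    | nil =>
      rw [pvGoB]
      have hM : pvMx space ([] : List Int) = 0 := rfl
      rw [hM]
      split_ifs with h1 h2
      · rfl
      · rw [show pvAch space ([] : List Int) = none from rfl, pvOmin_none_right]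
      · omega
    | cons x t =>
      rw [pvGoB.eq_def]
      dsimp only
      have hGfold : List.filter (fun n => PySem.Int.mod n space == PySem.Int.mod x space) (x :: t)
          = pvG space x t := rfl
      have hRfold : List.filter (fun n => !(PySem.Int.mod n space == PySem.Int.mod x space)) (x :: t)
          = pvR space x t := rfl
      rw [hGfold, hRfold]
      have hR' : pvR space x t = t.filter (fun n => !pvP space x n) := by
        rw [pvR, List.filter_cons]
        simp [pvP]
      have hlenR : (pvR space x t).length ≤ k := by
        have h1 : (t.filter (fun n => !pvP space x n)).length ≤ t.length :=
          List.length_filter_le _ _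
        have h2 : t.length + 1 ≤ k + 1 := by simpa using hlen
        rw [hR']
        omega
      have hxG : x ∈ pvG space x t := List.mem_filter.mpr ⟨by simp, by simp [pvP]⟩
      have hg1 : 1 ≤ ((pvG space x t).length : Int) := by
        have := List.length_pos_of_mem hxG
        omega
      obtain ⟨vg, hvg⟩ : ∃ vg, (pvG space x t).min? = some vg := by
        cases hGm : (pvG space x t).min? with
        | none => exact absurd (List.min?_eq_none_iff.mp hGm) (List.ne_nil_of_mem hxG)
        | some vg => exact ⟨vg, rfl⟩
      have hv : (PySem.List.min? (pvG space x t) (fun y => y)).getD 0 = vg := by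
        rw [← min?_eq_pymin, hvg]
        rfl
      rw [hv]
      have hMc := Mx_cons space x t
      have hMr0 := Mx_nonneg space (pvR space x t)
      cases bv with
      | none =>
        by_cases h1 : bc ≤ ((pvG space x t).length : Int)
        · have hcond : (bc < ((pvG space x t).length : Int)
              || (bc == ((pvG space x t).length : Int) && true)) = true := by
            rcases lt_or_eq_of_le h1 with h | h <;> simp [h]
          rw [if_pos hcond, ih _ hlenR _ _ (by omega)]
          rcases lt_trichotomy (pvMx space (pvR space x t)) ((pvG space x t).length : Int)
            with h2 | h2 | h2
          · rw [if_pos h2, ach_high space x t h2, hvg]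
            have hMx : pvMx space (x :: t) = ((pvG space x t).length : Int) := by omega
            rw [hMx]
            rcases lt_or_eq_of_le h1 with h | h
            · rw [if_neg (by omega), if_neg (by omega)]
            · rw [if_neg (by omega), if_pos (by omega), h]
              rfl
          · rw [if_neg (by omega), if_pos h2, ach_tie space x t h2, hvg]
            have hMx : pvMx space (x :: t) = ((pvG space x t).length : Int) := by omega
            rw [hMx]
            rcases lt_or_eq_of_le h1 with h | h
            · rw [if_neg (by omega), if_neg (by omega)]
            · rw [if_neg (by omega), if_pos (by omega), h]
              rfl
          · rw [if_neg (by omega), if_neg (by omega),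
              ach_low space x t (by omega)]
            have hMx : pvMx space (x :: t) = pvMx space (pvR space x t) := by omega
            rw [hMx, if_neg (by omega), if_neg (by omega)]
        · have hcond : (bc < ((pvG space x t).length : Int)
              || (bc == ((pvG space x t).length : Int) && true)) = false := by
            simp only [Bool.or_eq_false_iff, Bool.and_eq_false_iff]
            refine ⟨by simp; omega, Or.inl (by simp; omega)⟩
          rw [if_neg (by rw [hcond]; simp), ih _ hlenR _ _ hbc]
          rcases lt_trichotomy (pvMx space (pvR space x t)) bc with h2 | h2 | h2
          · rw [if_pos h2]
            have hMx : pvMx space (x :: t) < bc := by omega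
            rw [if_pos hMx]
          · rw [if_neg (by omega), if_pos h2]
            have hMx : pvMx space (x :: t) = bc := by omega
            rw [hMx, if_neg (by omega), if_pos rfl,
              ach_low space x t (by omega)]
          · rw [if_neg (by omega), if_neg (by omega),
              ach_low space x t (by omega)]
            have hMx : pvMx space (x :: t) = pvMx space (pvR space x t) := by omega
            rw [hMx, if_neg (by omega), if_neg (by omega)]
      | some b =>
        by_cases h1 : bc < ((pvG space x t).length : Int) ∨
            (bc = ((pvG space x t).length : Int) ∧ vg < b)
        · have hcond : (bc < ((pvG space x t).length : Int)
              || (bc == ((pvG space x t).length : Int) && decide (vg < b))) = true := by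
            rcases h1 with h | ⟨h, h'⟩
            · simp [h]
            · simp [h, h']
          rw [if_pos hcond, ih _ hlenR _ _ (by omega)]
          rcases lt_trichotomy (pvMx space (pvR space x t)) ((pvG space x t).length : Int)
            with h2 | h2 | h2
          · rw [if_pos h2, ach_high space x t h2, hvg]
            have hMx : pvMx space (x :: t) = ((pvG space x t).length : Int) := by omega
            rw [hMx]
            rcases h1 with h | ⟨h, h'⟩
            · rw [if_neg (by omega), if_neg (by omega)]
            · rw [if_neg (by omega), if_pos (by omega), h]
              simp only [pvOmin, Prod.mk.injEq, Option.some.injEq, true_and]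
              rw [min_eq_right h'.le]
          · rw [if_neg (by omega), if_pos h2, ach_tie space x t h2, hvg]
            have hMx : pvMx space (x :: t) = ((pvG space x t).length : Int) := by omega
            rw [hMx]
            rcases h1 with h | ⟨h, h'⟩
            · rw [if_neg (by omega), if_neg (by omega)]
            · rw [if_neg (by omega), if_pos (by omega), pvOmin_absorb b vg _ h', h]
          · rw [if_neg (by omega), if_neg (by omega),
              ach_low space x t (by omega)]
            have hMx : pvMx space (x :: t) = pvMx space (pvR space x t) := by omega
            have hbc' : bc < pvMx space (pvR space x t) := by
              rcases h1 with h | ⟨h, h'⟩ <;> omega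
            rw [hMx, if_neg (by omega), if_neg (by omega)]
        · have h1a : ¬ bc < ((pvG space x t).length : Int) := fun hlt => h1 (Or.inl hlt)
          have h1b : bc = ((pvG space x t).length : Int) → ¬ vg < b :=
            fun he hv => h1 (Or.inr ⟨he, hv⟩)
          have hcond : (bc < ((pvG space x t).length : Int)
              || (bc == ((pvG space x t).length : Int) && decide (vg < b))) = false := by
            by_cases heq : bc = ((pvG space x t).length : Int)
            · have := h1b heq
              simp [heq]
              omega
            · simp [heq]
              omega
          rw [if_neg (by rw [hcond]; simp), ih _ hlenR _ _ hbc]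
          have hgle : ((pvG space x t).length : Int) ≤ bc := by omega
          rcases lt_trichotomy (pvMx space (pvR space x t)) bc with h2 | h2 | h2
          · rw [if_pos h2]
            have hMx : pvMx space (x :: t) ≤ bc := by omega
            rcases lt_or_eq_of_le hMx with h3 | h3
            · rw [if_pos h3]
            · -- pvMx (x::t) = bc with Mr < bc forces g = bc, so Mr < g: class of x ties bc
              have hgbc : ((pvG space x t).length : Int) = bc := by omega
              have hble : b ≤ vg := by
                have := h1b hgbc.symm
                omega
              rw [if_neg (by omega), if_pos h3, ach_high space x t (by omega), hvg]
              simp only [pvOmin, Prod.mk.injEq, Option.some.injEq, true_and]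
              rw [min_eq_left hble]
          · rw [if_neg (by omega), if_pos h2]
            have hMx : pvMx space (x :: t) = bc := by omega
            rw [hMx, if_neg (by omega), if_pos rfl]
            rcases lt_or_eq_of_le hgle with h3 | h3
            · rw [ach_low space x t (by omega)]
            · have hble : b ≤ vg := by
                have := h1b h3.symm
                omega
              rw [ach_tie space x t (by omega), hvg, pvOmin_skip b vg _ hble]
          · rw [if_neg (by omega), if_neg (by omega),
              ach_low space x t (by omega)]
            have hMx : pvMx space (x :: t) = pvMx space (pvR space x t) := by omega
            rw [hMx, if_neg (by omega), if_neg (by omega)]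

-- ===== VERDICT (by name: the statement is the Claim_ definition above) =====
theorem destroyTargets_spec : Claim_equal_destroyTargets := by
  intro nums space _ _
  unfold Spec_destroyTargets destroyTargets destroyTargets_alt
  simp only [mpA_eq_counter]
  set c : Int → Int := fun n =>
    (PySem.Dict.counter (nums.map (fun num => PySem.Int.mod num space))).getD
      (PySem.Int.mod n space) 0 with hcdef
  rw [loopA_char c nums]
  have hc : c = pvCnt space nums := by
    funext n
    rw [hcdef]
    simp only [PySem.Dict.getD_counter, List.count_eq_countP, List.countP_map, pvCnt_eq_countP]
    rfl
  rw [hc, pvGoB_spec space nums.length nums le_rfl 0 none le_rfl]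
  have hM0 := Mx_nonneg space nums
  by_cases h : pvMx space nums = 0
  · rw [if_neg (by omega), if_pos h]
    rfl
  · rw [if_neg (by omega), if_neg h]
    rfl
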